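-- pv_equiv track=rewrite | github.com/quanewang/Practice | rearrange_array.py | extra_space_rearrange
-- ===== SOURCE A (Python) =====
-- def extra_space_rearrange(arr):
--     available = [1] * len(arr)
--     available[0] = 0
--
--     middle = len(arr) // 2
--
--     for i in range(1, len(arr)):
--         goal_index = i
--         pointed_to = arr[goal_index]
--         while available[i]:
--             goal_index = get_index(middle, goal_index)
--             available[goal_index] = 0
--             temp = arr[goal_index]
--             arr[goal_index] = pointed_to
--             pointed_to = temp
--     return arr
--
-- def get_index(middle, index):
--     if index < middle:
--         return 2 * index
--     return (index - middle) * 2 + 1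
-- ===== SOURCE B (Python) =====
-- def extra_space_rearrange(arr):
--     mid = len(arr) // 2
--     arr[:] = [x for pair in zip(arr[:mid], arr[mid:]) for x in pair] + arr[2 * mid:]
--     return arr
-- ===== Notes on version B (the rewrite author's own statement) =====
-- stated objective: simpler
-- what changed: Replaces the cycle-following rearrangement with its availability-marker array and inner while-loop by a single slice-and-zip interleave of the two halves assigned back into arr in place.
import Mathlib
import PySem

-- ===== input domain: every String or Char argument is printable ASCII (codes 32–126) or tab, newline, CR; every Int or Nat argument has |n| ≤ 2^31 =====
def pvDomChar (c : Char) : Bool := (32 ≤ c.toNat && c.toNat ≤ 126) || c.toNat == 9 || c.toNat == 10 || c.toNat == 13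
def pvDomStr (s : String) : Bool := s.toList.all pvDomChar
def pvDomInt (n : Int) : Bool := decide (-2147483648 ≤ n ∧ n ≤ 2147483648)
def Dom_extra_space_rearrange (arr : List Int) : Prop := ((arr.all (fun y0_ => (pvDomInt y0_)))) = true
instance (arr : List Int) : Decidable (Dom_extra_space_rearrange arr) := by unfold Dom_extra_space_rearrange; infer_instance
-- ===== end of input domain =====

-- B replaces A's cycle-following rearrangement (marker array + inner while loop) by one
-- slice-and-zip interleave of the two halves, assigned back into arr in place (simpler).
-- Both A and B mutate arr in place; the mutated contents equal the returned list in both.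

-- ===== PORT A =====
def pvGetIndex (middle index : Int) : Int :=
  if index < middle then 2 * index else (index - middle) * 2 + 1

-- the inner `while available[i]:` loop; fuel (= len(arr) at the call site) only makes the
-- recursion total — inside Pre_ the loop is proved to stop before the fuel runs out
def pvRearrangeWhile (middle i : Int) (fuel : Nat) (g pointed : Int)
    (avail a : List Int) : List Int × List Int :=
  match fuel with
  | 0 => (avail, a)
  | fuel + 1 =>
    if PySem.List.pyGetD avail i 0 ≠ 0 then
      let g' := pvGetIndex middle g
      let avail' := PySem.List.pySetD avail g' 0
      let t := PySem.List.pyGetD a g' 0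
      let a' := PySem.List.pySetD a g' pointed
      pvRearrangeWhile middle i fuel g' t avail' a'
    else (avail, a)

def extra_space_rearrange (arr : List Int) : List Int :=
  let avail := PySem.List.pySetD (PySem.List.pyRepeat [(1 : Int)] (arr.length : Int)) 0 0
  let middle := PySem.Int.floordiv (arr.length : Int) 2
  let st := (PySem.List.pyRange 1 (arr.length : Int) 1).foldl
    (fun st i =>
      let pointed := PySem.List.pyGetD st.2 i 0
      pvRearrangeWhile middle i arr.length i pointed st.1 st.2)
    (avail, arr)
  st.2

-- ===== PORT B =====
def extra_space_rearrange_alt (arr : List Int) : List Int :=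
  let mid := PySem.Int.floordiv (arr.length : Int) 2
  ((PySem.List.slice arr none (some mid)).zip (PySem.List.slice arr (some mid) none)).flatMap
      (fun p => [p.1, p.2])
    ++ PySem.List.slice arr (some (2 * mid)) none

-- ===== PRECONDITION & SPEC =====
-- Pre_ excludes exactly the inputs where A raises IndexError: the empty list (available[0])
-- and odd lengths ≥ 3 (the shuffle index map hits index len(arr), out of range).
def Pre_extra_space_rearrange (arr : List Int) : Prop :=
  arr ≠ [] ∧ (arr.length = 1 ∨ arr.length % 2 = 0)
instance (arr : List Int) : Decidable (Pre_extra_space_rearrange arr) := by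
  unfold Pre_extra_space_rearrange; infer_instance

def pvWitness_extra_space_rearrange : List Int := [3, 1, 4, 1, 5, 9]

def Spec_extra_space_rearrange (arr : List Int) (out : List Int) : Prop :=
  out = extra_space_rearrange_alt arr
instance (arr : List Int) (out : List Int) : Decidable (Spec_extra_space_rearrange arr out) := by
  unfold Spec_extra_space_rearrange; infer_instance

-- ===== CLAIM (what is proved, stated in full; the proofs are below) =====
def Claim_equal_extra_space_rearrange : Prop := ∀ (arr : List Int),
  Dom_extra_space_rearrange arr → Pre_extra_space_rearrange arr →
  Spec_extra_space_rearrange arr (extra_space_rearrange arr)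

-- ===== LEMMAS AND PROOFS =====

-- Nat-level versions of the index permutation and its inverse
def pvSig (m j : Nat) : Nat := if j < m then 2 * j else 2 * (j - m) + 1
def pvSigInv (m j : Nat) : Nat := if j % 2 = 0 then j / 2 else m + j / 2
-- t-fold iterate of the permutation (the cycle walk)
def pvOrb (m i t : Nat) : Nat := (pvSig m)^[t] i

-- indices already placed after the outer loop processed i = 1 .. k
def pvReach (m k j : Nat) : Prop := ∃ s t, s ≤ k ∧ pvOrb m s t = j

-- availability-marker state: avail[j] = 0 exactly on P
def AvState (P : Nat → Prop) (n : Nat) (avail : List Int) : Prop :=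
  avail.length = n ∧ ∀ j, j < n →
    (P j → avail.getD j 0 = 0) ∧ (¬ P j → avail.getD j 0 = 1)

-- array state: placed indices hold old[σ⁻¹ j], the rest still old[j]
def ArrState (P : Nat → Prop) (m : Nat) (old a : List Int) : Prop :=
  a.length = 2 * m ∧ ∀ j, j < 2 * m →
    (P j → a.getD j 0 = old.getD (pvSigInv m j) 0) ∧ (¬ P j → a.getD j 0 = old.getD j 0)

theorem pvSigInv_pvSig (m j : Nat) : pvSigInv m (pvSig m j) = j := by
  unfold pvSig pvSigInv; split_ifs with h1 h2 h2 <;> omega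

theorem pvSig_inj (m : Nat) : Function.Injective (pvSig m) := by
  intro a b h
  have := pvSigInv_pvSig m a
  rw [h, pvSigInv_pvSig] at this
  omega

theorem pvSig_lt (m j : Nat) (h : j < 2 * m) : pvSig m j < 2 * m := by
  unfold pvSig; split_ifs <;> omega

theorem pvOrb_zero (m i : Nat) : pvOrb m i 0 = i := rfl

theorem pvOrb_succ (m i t : Nat) : pvOrb m i (t + 1) = pvSig m (pvOrb m i t) := by
  unfold pvOrb; rw [Function.iterate_succ_apply']

theorem pvOrb_add (m i s t : Nat) : pvOrb m i (s + t) = (pvSig m)^[s] (pvOrb m i t) := by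
  unfold pvOrb; rw [Function.iterate_add_apply]

theorem pvOrb_lt (m i : Nat) (hi : i < 2 * m) : ∀ t, pvOrb m i t < 2 * m := by
  intro t; induction t with
  | zero => simpa [pvOrb_zero] using hi
  | succ t ih => rw [pvOrb_succ]; exact pvSig_lt m _ ih

theorem pvOrb_inj (m i : Nat) {a b : Nat} (h : pvOrb m i a = pvOrb m i b) (hab : a ≤ b) :
    pvOrb m i (b - a) = i := by
  have hb : b = a + (b - a) := by omega
  rw [hb, pvOrb_add] at h
  have := (pvSig_inj m).iterate a h
  simpa [pvOrb] using this.symm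

theorem pv_exists_period (m i : Nat) (hi : i < 2 * m) :
    ∃ c, 0 < c ∧ c ≤ 2 * m ∧ pvOrb m i c = i := by
  have hmap : ∀ t ∈ Finset.range (2 * m + 1), pvOrb m i t ∈ Finset.range (2 * m) := by
    intro t _; exact Finset.mem_range.mpr (pvOrb_lt m i hi t)
  have hcard : (Finset.range (2 * m)).card < (Finset.range (2 * m + 1)).card := by
    simp
  obtain ⟨a, ha, b, hb, hne, heq⟩ :=
    Finset.exists_ne_map_eq_of_card_lt_of_maps_to hcard hmap
  simp only [Finset.mem_range] at ha hb
  rcases Nat.lt_or_ge a b with hab | hab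
  · exact ⟨b - a, by omega, by omega, pvOrb_inj m i heq (by omega)⟩
  · have hba : b < a := by omega
    exact ⟨a - b, by omega, by omega, pvOrb_inj m i heq.symm (by omega)⟩

-- period facts, stated for a minimal period c
theorem pvOrb_period (m i c : Nat) (hcc : pvOrb m i c = i) (t : Nat) :
    pvOrb m i (t + c) = pvOrb m i t := by
  rw [pvOrb_add, hcc]; rfl

theorem pvOrb_mod (m i c : Nat) (hc0 : 0 < c) (hcc : pvOrb m i c = i) (t : Nat) :
    pvOrb m i t = pvOrb m i (t % c) := by
  induction t using Nat.strong_induction_on with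
  | _ t ih =>
    rcases Nat.lt_or_ge t c with h | h
    · rw [Nat.mod_eq_of_lt h]
    · have h1 : t = (t - c) + c := by omega
      have h2 : (t - c + c) % c = (t - c) % c := Nat.add_mod_right _ _
      calc pvOrb m i t = pvOrb m i (t - c + c) := by rw [← h1]
        _ = pvOrb m i (t - c) := pvOrb_period m i c hcc (t - c)
        _ = pvOrb m i ((t - c) % c) := ih (t - c) (by omega)
        _ = pvOrb m i (t % c) := by rw [← h2, ← h1]

theorem pvOrb_inj_Icc (m i c : Nat)
    (hmin : ∀ t, 0 < t → t < c → pvOrb m i t ≠ i)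
    {a b : Nat} (ha1 : 1 ≤ a) (hac : a ≤ c) (hb1 : 1 ≤ b) (hbc : b ≤ c)
    (h : pvOrb m i a = pvOrb m i b) : a = b := by
  rcases Nat.lt_trichotomy a b with hab | hab | hab
  · exact absurd (pvOrb_inj m i h (by omega)) (hmin (b - a) (by omega) (by omega))
  · exact hab
  · exact absurd (pvOrb_inj m i h.symm (by omega)) (hmin (a - b) (by omega) (by omega))

-- reach lemmas
theorem pvReach_self (m k : Nat) : pvReach m k k := ⟨k, 0, le_refl k, rfl⟩

theorem pvReach_orbit_not (m k i c : Nat) (hc0 : 0 < c) (hcc : pvOrb m i c = i)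
    (hni : ¬ pvReach m k i) : ∀ t, ¬ pvReach m k (pvOrb m i t) := by
  intro t ⟨s, u, hs, hu⟩
  apply hni
  refine ⟨s, (c - t % c) + u, hs, ?_⟩
  rw [pvOrb_add, hu]
  have h1 : c - t % c + t % c = c := by
    have := Nat.mod_lt t hc0
    omega
  calc (pvSig m)^[c - t % c] (pvOrb m i t)
      = (pvSig m)^[c - t % c] (pvOrb m i (t % c)) := by rw [← pvOrb_mod m i c hc0 hcc]
    _ = pvOrb m i (c - t % c + t % c) := (pvOrb_add m i (c - t % c) (t % c)).symm
    _ = i := by rw [h1, hcc]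

theorem pvReach_succ_of_reach (m k j : Nat) (hr : pvReach m k (k + 1)) :
    pvReach m (k + 1) j ↔ pvReach m k j := by
  constructor
  · rintro ⟨s, t, hs, ht⟩
    rcases Nat.lt_or_ge s (k + 1) with h | h
    · exact ⟨s, t, by omega, ht⟩
    · obtain ⟨s', t', hs', ht'⟩ := hr
      have hsk : s = k + 1 := by omega
      refine ⟨s', t + t', hs', ?_⟩
      rw [pvOrb_add, ht', ← hsk]
      exact ht
  · rintro ⟨s, t, hs, ht⟩; exact ⟨s, t, by omega, ht⟩

theorem pvReach_succ (m k j : Nat) :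
    pvReach m (k + 1) j ↔ pvReach m k j ∨ ∃ t, pvOrb m (k + 1) t = j := by
  constructor
  · rintro ⟨s, t, hs, ht⟩
    rcases Nat.lt_or_ge s (k + 1) with h | h
    · exact Or.inl ⟨s, t, by omega, ht⟩
    · exact Or.inr ⟨t, by rwa [show s = k + 1 by omega] at ht⟩
  · rintro (⟨s, t, hs, ht⟩ | ⟨t, ht⟩)
    · exact ⟨s, t, by omega, ht⟩
    · exact ⟨k + 1, t, le_refl _, ht⟩

-- predicate congruence for the state descriptions
theorem AvState_iff {P Q : Nat → Prop} (h : ∀ j, P j ↔ Q j) {n : Nat} {avail : List Int}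
    (hs : AvState P n avail) : AvState Q n avail := by
  obtain ⟨hl, hp⟩ := hs
  exact ⟨hl, fun j hj => ⟨fun hq => (hp j hj).1 ((h j).mpr hq),
    fun hq => (hp j hj).2 (fun hpj => hq ((h j).mp hpj))⟩⟩

theorem ArrState_iff {P Q : Nat → Prop} (h : ∀ j, P j ↔ Q j) {m : Nat} {old a : List Int}
    (hs : ArrState P m old a) : ArrState Q m old a := by
  obtain ⟨hl, hp⟩ := hs
  exact ⟨hl, fun j hj => ⟨fun hq => (hp j hj).1 ((h j).mpr hq),
    fun hq => (hp j hj).2 (fun hpj => hq ((h j).mp hpj))⟩⟩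

-- getD / set helpers
theorem getD_set_self (xs : List Int) (u : Nat) (v : Int) (h : u < xs.length) :
    (xs.set u v).getD u 0 = v := by
  rw [List.getD_eq_getElem _ _ (by simpa using h)]
  simp [List.getElem_set_self]

theorem getD_set_ne (xs : List Int) (u j : Nat) (v : Int) (h : j ≠ u) :
    (xs.set u v).getD j 0 = xs.getD j 0 := by
  rcases Nat.lt_or_ge j xs.length with hj | hj
  · rw [List.getD_eq_getElem _ _ (by simpa using hj), List.getD_eq_getElem _ _ hj]
    exact List.getElem_set_ne (show u ≠ j by omega) _
  · rw [List.getD_eq_default _ _ (by simpa using hj), List.getD_eq_default _ _ hj]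

-- cast bridge for get_index
theorem pvGetIndex_natCast (m j : Nat) : pvGetIndex (m : Int) (j : Int) = (pvSig m j : Int) := by
  unfold pvGetIndex pvSig
  split_ifs with h1 h2 h2 <;> push_cast <;> omega

-- the while loop does nothing when available[i] is already 0
theorem pvRearrangeWhile_stop (middle : Int) (i : Nat) (fuel : Nat) (g pointed : Int)
    (avail a : List Int) (h : avail.getD i 0 = 0) :
    pvRearrangeWhile middle (i : Int) fuel g pointed avail a = (avail, a) := by
  cases fuel with
  | zero => rfl
  | succ fuel =>
    unfold pvRearrangeWhile
    rw [List.getD_eq_getElem?_getD] at h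
    simp [PySem.List.pyGetD_natCast, List.getD_eq_getElem?_getD, h]

-- normalising an arbitrary orbit exponent into [1, c]
theorem orbit_norm (m i c : Nat) (hc0 : 0 < c) (hcc : pvOrb m i c = i) (j : Nat) :
    (∃ s, 1 ≤ s ∧ s ≤ c ∧ pvOrb m i s = j) ↔ ∃ t, pvOrb m i t = j := by
  constructor
  · rintro ⟨s, _, _, hs⟩; exact ⟨s, hs⟩
  · rintro ⟨t, ht⟩
    rcases Nat.eq_zero_or_pos (t % c) with h | h
    · refine ⟨c, hc0, le_refl c, ?_⟩
      rw [hcc, ← pvOrb_zero m i, ← h, ← pvOrb_mod m i c hc0 hcc, ht]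
    · refine ⟨t % c, h, le_of_lt (Nat.mod_lt t hc0), ?_⟩
      rw [← pvOrb_mod m i c hc0 hcc, ht]

theorem while_spec (m : Nat) (old : List Int) (i : Nat) (hi : i < 2 * m)
    (c : Nat) (hc0 : 0 < c) (hcc : pvOrb m i c = i)
    (hmin : ∀ t, 0 < t → t < c → pvOrb m i t ≠ i)
    (S : Nat → Prop) (hSi : ∀ t, ¬ S (pvOrb m i t)) :
    ∀ r, r ≤ c → ∀ fuel, r ≤ fuel → ∀ avail a,
    AvState (fun j => S j ∨ ∃ s, 1 ≤ s ∧ s ≤ c - r ∧ pvOrb m i s = j) (2 * m) avail →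
    ArrState (fun j => S j ∨ ∃ s, 1 ≤ s ∧ s ≤ c - r ∧ pvOrb m i s = j) m old a →
    AvState (fun j => S j ∨ ∃ t, pvOrb m i t = j) (2 * m)
      (pvRearrangeWhile (m : Int) (i : Int) fuel ((pvOrb m i (c - r) : Nat) : Int)
        (old.getD (pvOrb m i (c - r)) 0) avail a).1 ∧
    ArrState (fun j => S j ∨ ∃ t, pvOrb m i t = j) m old
      (pvRearrangeWhile (m : Int) (i : Int) fuel ((pvOrb m i (c - r) : Nat) : Int)
        (old.getD (pvOrb m i (c - r)) 0) avail a).2 := by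
  intro r
  induction r with
  | zero =>
    intro _ fuel _ avail a hav harr
    have hPi : (fun j => S j ∨ ∃ s, 1 ≤ s ∧ s ≤ c - 0 ∧ pvOrb m i s = j) i :=
      Or.inr ⟨c, hc0, by omega, hcc⟩
    have h0 : avail.getD i 0 = 0 := (hav.2 i hi).1 hPi
    rw [pvRearrangeWhile_stop _ _ _ _ _ _ _ h0]
    have hiff : ∀ j, (S j ∨ ∃ s, 1 ≤ s ∧ s ≤ c - 0 ∧ pvOrb m i s = j) ↔
        (S j ∨ ∃ t, pvOrb m i t = j) := by
      intro j
      constructor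
      · rintro (h | h)
        · exact Or.inl h
        · exact Or.inr ((orbit_norm m i c hc0 hcc j).mp (by simpa using h))
      · rintro (h | h)
        · exact Or.inl h
        · exact Or.inr (by simpa using (orbit_norm m i c hc0 hcc j).mpr h)
    exact ⟨AvState_iff hiff hav, ArrState_iff hiff harr⟩
  | succ r ih =>
    intro hr1 fuel hf avail a hav harr
    cases fuel with
    | zero => omega
    | succ f =>
      -- the current predicate
      set P : Nat → Prop := fun j => S j ∨ ∃ s, 1 ≤ s ∧ s ≤ c - (r + 1) ∧ pvOrb m i s = j
        with hP
      have hnotPi : ¬ P i := by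
        rintro (h | ⟨s, hs1, hs2, hss⟩)
        · exact hSi 0 h
        · exact hmin s hs1 (by omega) hss
      have h1 : avail.getD i 0 = 1 := (hav.2 i hi).2 hnotPi
      have hcond : PySem.List.pyGetD avail (i : Int) 0 = 1 := by
        rw [PySem.List.pyGetD_natCast]; exact h1
      have hsucc : c - r = (c - (r + 1)) + 1 := by omega
      have horb : pvOrb m i (c - r) = pvSig m (pvOrb m i (c - (r + 1))) := by
        rw [hsucc, pvOrb_succ]
      have hglt : pvOrb m i (c - r) < 2 * m := pvOrb_lt m i hi _
      -- the next orbit element is still untouched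
      have hnotPg : ¬ P (pvOrb m i (c - r)) := by
        rintro (h | ⟨s, hs1, hs2, hss⟩)
        · exact hSi _ h
        · have := pvOrb_inj_Icc m i c hmin hs1 (by omega) (by omega : 1 ≤ c - r)
            (by omega : c - r ≤ c) hss
          omega
      have hag : a.getD (pvOrb m i (c - r)) 0 = old.getD (pvOrb m i (c - r)) 0 :=
        (harr.2 _ hglt).2 hnotPg
      -- unfold one step of the while loop
      unfold pvRearrangeWhile
      rw [if_pos (by rw [hcond]; norm_num)]
      simp only [pvGetIndex_natCast, ← horb, PySem.List.pySetD_natCast,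
        PySem.List.pyGetD_natCast, hag]
      -- the predicate after this step
      have havl : avail.length = 2 * m := hav.1
      have harl : a.length = 2 * m := harr.1
      have hstep := ih (by omega) f (by omega)
        (avail.set (pvOrb m i (c - r)) 0)
        (a.set (pvOrb m i (c - r)) (old.getD (pvOrb m i (c - (r + 1))) 0))
        (by
          refine ⟨by simp [havl], fun j hj => ⟨fun hp => ?_, fun hp => ?_⟩⟩
          · by_cases hje : j = pvOrb m i (c - r)
            · rw [hje, getD_set_self _ _ _ (by omega)]
            · rw [getD_set_ne _ _ _ _ hje]
              refine (hav.2 j hj).1 ?_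
              rcases hp with h | ⟨s, hs1, hs2, hss⟩
              · exact Or.inl h
              · rcases Nat.lt_or_ge s (c - r) with h' | h'
                · exact Or.inr ⟨s, hs1, by omega, hss⟩
                · exact absurd (by rw [← hss]; congr 1; omega) hje
          · by_cases hje : j = pvOrb m i (c - r)
            · exact absurd (Or.inr ⟨c - r, by omega, by omega, hje.symm⟩) hp
            · rw [getD_set_ne _ _ _ _ hje]
              refine (hav.2 j hj).2 ?_
              rintro (h | ⟨s, hs1, hs2, hss⟩)
              · exact hp (Or.inl h)
              · exact hp (Or.inr ⟨s, hs1, by omega, hss⟩))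
        (by
          refine ⟨by simp [harl], fun j hj => ⟨fun hp => ?_, fun hp => ?_⟩⟩
          · by_cases hje : j = pvOrb m i (c - r)
            · rw [hje, getD_set_self _ _ _ (by omega)]
              congr 1
              rw [horb, pvSigInv_pvSig]
            · rw [getD_set_ne _ _ _ _ hje]
              refine (harr.2 j hj).1 ?_
              rcases hp with h | ⟨s, hs1, hs2, hss⟩
              · exact Or.inl h
              · rcases Nat.lt_or_ge s (c - r) with h' | h'
                · exact Or.inr ⟨s, hs1, by omega, hss⟩
                · exact absurd (by rw [← hss]; congr 1; omega) hje
          · by_cases hje : j = pvOrb m i (c - r)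
            · exact absurd (Or.inr ⟨c - r, by omega, by omega, hje.symm⟩) hp
            · rw [getD_set_ne _ _ _ _ hje]
              refine (harr.2 j hj).2 ?_
              rintro (h | ⟨s, hs1, hs2, hss⟩)
              · exact hp (Or.inl h)
              · exact hp (Or.inr ⟨s, hs1, by omega, hss⟩))
      exact hstep

theorem pvSig_zero (m : Nat) (hm : 1 ≤ m) : pvSig m 0 = 0 := by
  unfold pvSig; split_ifs <;> omega

theorem pvReach_zero (m : Nat) (hm : 1 ≤ m) (j : Nat) : pvReach m 0 j ↔ j = 0 := by
  constructor
  · rintro ⟨s, t, hs, ht⟩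
    have hs0 : s = 0 := by omega
    subst hs0
    have : ∀ u, pvOrb m 0 u = 0 := by
      intro u; induction u with
      | zero => rfl
      | succ u ih => rw [pvOrb_succ, ih, pvSig_zero m hm]
    rw [← ht, this]
  · rintro rfl; exact pvReach_self m 0

theorem pvSigInv_zero (m : Nat) : pvSigInv m 0 = 0 := by
  unfold pvSigInv; norm_num

theorem outer_spec (m : Nat) (hm : 1 ≤ m) (old : List Int) (hlen : old.length = 2 * m) :
    ∀ K, K ≤ 2 * m - 1 →
    AvState (pvReach m K) (2 * m)
      ((PySem.List.pyRange 1 ((K : Int) + 1) 1).foldl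
        (fun st i =>
          let pointed := PySem.List.pyGetD st.2 i 0
          pvRearrangeWhile (m : Int) i (2 * m) i pointed st.1 st.2)
        ((PySem.List.pyRepeat [(1 : Int)] ((2 * m : Nat) : Int)).set 0 0, old)).1 ∧
    ArrState (pvReach m K) m old
      ((PySem.List.pyRange 1 ((K : Int) + 1) 1).foldl
        (fun st i =>
          let pointed := PySem.List.pyGetD st.2 i 0
          pvRearrangeWhile (m : Int) i (2 * m) i pointed st.1 st.2)
        ((PySem.List.pyRepeat [(1 : Int)] ((2 * m : Nat) : Int)).set 0 0, old)).2 := by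
  intro K
  induction K with
  | zero =>
    intro _
    rw [show ((0 : Nat) : Int) + 1 = 1 by norm_num,
      PySem.List.pyRange_one_eq_nil (le_refl 1), List.foldl_nil]
    have hrep : PySem.List.pyRepeat [(1 : Int)] ((2 * m : Nat) : Int) =
        List.replicate (2 * m) 1 := by
      rw [PySem.List.pyRepeat_singleton]
      congr 1
    constructor
    · refine ⟨by rw [hrep]; simp, fun j hj => ⟨fun hp => ?_, fun hp => ?_⟩⟩
      · have hj0 : j = 0 := (pvReach_zero m hm j).mp hp
        subst hj0
        rw [hrep, getD_set_self _ _ _ (by simpa using hj)]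
      · have hj0 : j ≠ 0 := fun h => hp ((pvReach_zero m hm j).mpr h)
        rw [hrep, getD_set_ne _ _ _ _ hj0,
          List.getD_eq_getElem _ _ (by simpa using hj), List.getElem_replicate]
    · refine ⟨hlen, fun j hj => ⟨fun hp => ?_, fun hp => ?_⟩⟩
      · have hj0 : j = 0 := (pvReach_zero m hm j).mp hp
        subst hj0
        rw [pvSigInv_zero]
      · rfl
  | succ K ih =>
    intro hK1
    have hstep := ih (by omega)
    have hi2 : K + 1 < 2 * m := by omega
    -- split off the last index of the range
    have hsplit : PySem.List.pyRange 1 (((K + 1 : Nat) : Int) + 1) 1 =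
        PySem.List.pyRange 1 ((K : Int) + 1) 1 ++ [(K : Int) + 1] := by
      rw [show (((K + 1 : Nat) : Int) + 1) = ((K : Int) + 1) + 1 by push_cast; ring]
      exact PySem.List.pyRange_one_succ_right (by omega)
    rw [hsplit, List.foldl_append]
    set st := (PySem.List.pyRange 1 ((K : Int) + 1) 1).foldl
      (fun st i =>
        let pointed := PySem.List.pyGetD st.2 i 0
        pvRearrangeWhile (m : Int) i (2 * m) i pointed st.1 st.2)
      ((PySem.List.pyRepeat [(1 : Int)] ((2 * m : Nat) : Int)).set 0 0, old) with hst
    simp only [List.foldl_cons, List.foldl_nil]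
    have hcast : ((K : Int) + 1) = (((K + 1 : Nat)) : Int) := by push_cast; ring
    rw [hcast]
    by_cases hreach : pvReach m K (K + 1)
    · -- already placed: the while loop is a no-op
      have h0 : st.1.getD (K + 1) 0 = 0 := (hstep.1.2 (K + 1) hi2).1 hreach
      rw [pvRearrangeWhile_stop _ _ _ _ _ _ _ h0]
      have hiff := pvReach_succ_of_reach m K
      exact ⟨AvState_iff (fun j => (hiff j hreach).symm) hstep.1,
        ArrState_iff (fun j => (hiff j hreach).symm) hstep.2⟩
    · -- a fresh cycle: run the while loop around it
      obtain ⟨c0, hc00, hc0le, hc0orb⟩ := pv_exists_period m (K + 1) hi2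
      have hQ : ∃ t, 0 < t ∧ pvOrb m (K + 1) t = K + 1 := ⟨c0, hc00, hc0orb⟩
      set c := Nat.find hQ with hc
      obtain ⟨hcpos, hcorb⟩ := Nat.find_spec hQ
      have hcle : c ≤ 2 * m := le_trans (Nat.find_min' hQ ⟨hc00, hc0orb⟩) hc0le
      have hmin : ∀ t, 0 < t → t < c → pvOrb m (K + 1) t ≠ K + 1 := by
        intro t ht0 htc habs
        exact Nat.find_min hQ htc ⟨ht0, habs⟩
      have hSi : ∀ t, ¬ pvReach m K (pvOrb m (K + 1) t) :=
        pvReach_orbit_not m K (K + 1) c hcpos hcorb hreach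
      have hpt : PySem.List.pyGetD st.2 (((K + 1 : Nat)) : Int) 0 =
          old.getD (K + 1) 0 := by
        rw [PySem.List.pyGetD_natCast]
        exact (hstep.2.2 (K + 1) hi2).2 hreach
      have hempty : ∀ j, pvReach m K j ↔
          (pvReach m K j ∨ ∃ s, 1 ≤ s ∧ s ≤ c - c ∧ pvOrb m (K + 1) s = j) := by
        intro j
        constructor
        · exact Or.inl
        · rintro (h | ⟨s, hs1, hs2, _⟩)
          · exact h
          · omega
      have hws := while_spec m old (K + 1) hi2 c hcpos hcorb hmin
        (pvReach m K) hSi c (le_refl c) (2 * m) hcle st.1 st.2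
        (AvState_iff hempty hstep.1) (ArrState_iff hempty hstep.2)
      rw [Nat.sub_self] at hws
      have horb0 : pvOrb m (K + 1) 0 = K + 1 := rfl
      rw [horb0] at hws
      rw [hpt]
      have hiff : ∀ j, (pvReach m K j ∨ ∃ t, pvOrb m (K + 1) t = j) ↔
          pvReach m (K + 1) j := fun j => (pvReach_succ m K j).symm
      exact ⟨AvState_iff hiff hws.1, ArrState_iff hiff hws.2⟩

-- B-side: the interleave of two equal-length lists, elementwise
theorem interleave_getD : ∀ (xs ys : List Int), xs.length = ys.length →
    ((xs.zip ys).flatMap (fun p => [p.1, p.2])).length = 2 * xs.length ∧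
    ∀ j, j < 2 * xs.length →
      ((xs.zip ys).flatMap (fun p => [p.1, p.2])).getD j 0 =
        if j % 2 = 0 then xs.getD (j / 2) 0 else ys.getD (j / 2) 0 := by
  intro xs
  induction xs with
  | nil =>
    intro ys h
    refine ⟨by simp, fun j hj => ?_⟩
    simp at hj
  | cons x xs ih =>
    intro ys h
    cases ys with
    | nil => simp at h
    | cons y ys =>
      have h' : xs.length = ys.length := by simpa using h
      obtain ⟨ihl, ihg⟩ := ih ys h'
      constructor
      · simp only [List.zip_cons_cons, List.flatMap_cons, List.length_append, ihl,
          List.length_cons]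
        simp; omega
      · intro j hj
        rcases j with _ | _ | j
        · simp [List.zip_cons_cons]
        · simp [List.zip_cons_cons]
        · have hjlt : j < 2 * xs.length := by simp at hj; omega
          have hrec := ihg j hjlt
          have hflat : (((x :: xs).zip (y :: ys)).flatMap
              (fun p => [p.1, p.2])).getD (j + 2) 0 =
              ((xs.zip ys).flatMap (fun p => [p.1, p.2])).getD j 0 := by
            simp [List.zip_cons_cons]
          rw [hflat, hrec]
          have hm2 : (j + 2) % 2 = j % 2 := by omega
          have hd2 : (j + 2) / 2 = j / 2 + 1 := by omega
          rw [hm2, hd2]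
          by_cases hp : j % 2 = 0
          · simp [hp]
          · simp [hp]

-- two lists agreeing in length and in getD at every index are equal
theorem eq_of_length_getD (xs ys : List Int) (hl : xs.length = ys.length)
    (h : ∀ j, j < xs.length → xs.getD j 0 = ys.getD j 0) : xs = ys := by
  apply List.ext_getElem hl
  intro j h1 h2
  have := h j h1
  rwa [List.getD_eq_getElem _ _ h1, List.getD_eq_getElem _ _ h2] at this

theorem alt_spec (m : Nat) (arr : List Int) (hlen : arr.length = 2 * m) :
    (extra_space_rearrange_alt arr).length = 2 * m ∧
    ∀ j, j < 2 * m →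
      (extra_space_rearrange_alt arr).getD j 0 = arr.getD (pvSigInv m j) 0 := by
  have hfd : PySem.Int.floordiv ((arr.length : Nat) : Int) 2 = (m : Int) := by
    rw [hlen, show (2 : Int) = ((2 : Nat) : Int) by norm_num, PySem.Int.floordiv_natCast]
    congr 1; omega
  simp only [extra_space_rearrange_alt, hfd]
  rw [PySem.List.slice_to_natCast, PySem.List.slice_from_natCast,
    show (2 * (m : Int)) = (((2 * m : Nat)) : Int) by push_cast; ring,
    PySem.List.slice_from_natCast,
    List.drop_eq_nil_of_le (by omega : arr.length ≤ 2 * m), List.append_nil]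
  have htl : (arr.take m).length = m := by rw [List.length_take]; omega
  have hdl : (arr.drop m).length = m := by rw [List.length_drop]; omega
  obtain ⟨hl, hg⟩ := interleave_getD (arr.take m) (arr.drop m) (by rw [htl, hdl])
  rw [htl] at hl hg
  refine ⟨hl, fun j hj => ?_⟩
  rw [hg j hj]
  unfold pvSigInv
  by_cases hp : j % 2 = 0
  · rw [if_pos hp, if_pos hp]
    have hj2 : j / 2 < m := by omega
    rw [List.getD_eq_getElem _ _ (by rw [htl]; exact hj2),
      List.getD_eq_getElem _ _ (by omega)]
    simp [List.getElem_take]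
  · rw [if_neg hp, if_neg hp]
    have hj2 : j / 2 < m := by omega
    rw [List.getD_eq_getElem _ _ (by rw [hdl]; exact hj2),
      List.getD_eq_getElem _ _ (show m + j / 2 < arr.length by omega)]
    simp [List.getElem_drop]

theorem a_spec (m : Nat) (hm : 1 ≤ m) (arr : List Int) (hlen : arr.length = 2 * m) :
    (extra_space_rearrange arr).length = 2 * m ∧
    ∀ j, j < 2 * m →
      (extra_space_rearrange arr).getD j 0 = arr.getD (pvSigInv m j) 0 := by
  have hout := outer_spec m hm arr hlen (2 * m - 1) (le_refl _)
  have hKcast : (((2 * m - 1 : Nat)) : Int) + 1 = ((2 * m : Nat) : Int) := by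
    have h1 : (1 : Nat) ≤ 2 * m := by omega
    push_cast [Nat.cast_sub h1]
    ring
  rw [hKcast] at hout
  have hfd2 : PySem.Int.floordiv (((2 * m : Nat)) : Int) 2 = (m : Int) := by
    rw [show (2 : Int) = ((2 : Nat) : Int) by norm_num, PySem.Int.floordiv_natCast]
    congr 1; omega
  have hset : PySem.List.pySetD (PySem.List.pyRepeat [(1 : Int)] (((2 * m : Nat)) : Int))
      (0 : Int) (0 : Int) =
      (PySem.List.pyRepeat [(1 : Int)] ((2 * m : Nat) : Int)).set 0 0 := by
    rw [show (0 : Int) = ((0 : Nat) : Int) from rfl, PySem.List.pySetD_natCast]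
  simp only [extra_space_rearrange, hlen, hfd2, hset]
  exact ⟨hout.2.1, fun j hj => (hout.2.2 j hj).1 ⟨j, 0, by omega, rfl⟩⟩

-- ===== VERDICT (by name: the statement is the Claim_ definition above) =====
theorem extra_space_rearrange_spec : Claim_equal_extra_space_rearrange := by
  intro arr _ hpre
  unfold Spec_extra_space_rearrange
  obtain ⟨hne, h1 | h2⟩ := hpre
  · -- length 1: both are the identity
    obtain ⟨x, rfl⟩ : ∃ x, arr = [x] := by
      cases arr with
      | nil => exact absurd rfl hne
      | cons x t => cases t with
        | nil => exact ⟨x, rfl⟩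
        | cons y t => simp at h1
    rfl
  · -- even length 2*m, m ≥ 1
    have hm : 1 ≤ arr.length / 2 := by
      have : arr.length ≠ 0 := fun h => hne (List.eq_nil_of_length_eq_zero h)
      omega
    have hlen : arr.length = 2 * (arr.length / 2) := by omega
    obtain ⟨hal, hag⟩ := a_spec (arr.length / 2) hm arr hlen
    obtain ⟨hbl, hbg⟩ := alt_spec (arr.length / 2) arr hlen
    apply eq_of_length_getD _ _ (by omega)
    intro j hj
    rw [hag j (by omega), hbg j (by omega)]
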